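-- pv_equiv track=rewrite | github.com/LiquidDuck/Piecewise-Encryption- | main.py | u_through_z
-- ===== SOURCE A (Python) =====
-- def u_through_z(character):
--     factor_list=[]
--     for i in range(1, character + 1):
--        if character % i == 0:
--            factor_list.append(i)
--     variable= factor_list[-2]
--     variable=variable*2
--     return (variable)
-- ===== SOURCE B (Python) =====
-- def u_through_z(character):
--     # second-largest divisor, times two: 2 * (character // smallest divisor > 1)
--     d = 2
--     while d * d <= character:
--         if character % d == 0:
--             return 2 * (character // d)
--         d += 1
--     return 2
-- ===== Notes on version B (the rewrite author's own statement) =====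
-- stated objective: faster
-- what changed: Instead of building the full divisor list over 1..n and indexing its second-to-last element, B scans d = 2..sqrt(n) for the smallest non-trivial divisor and returns 2*(n//d), falling back to 2 when n is prime.
import Mathlib
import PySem

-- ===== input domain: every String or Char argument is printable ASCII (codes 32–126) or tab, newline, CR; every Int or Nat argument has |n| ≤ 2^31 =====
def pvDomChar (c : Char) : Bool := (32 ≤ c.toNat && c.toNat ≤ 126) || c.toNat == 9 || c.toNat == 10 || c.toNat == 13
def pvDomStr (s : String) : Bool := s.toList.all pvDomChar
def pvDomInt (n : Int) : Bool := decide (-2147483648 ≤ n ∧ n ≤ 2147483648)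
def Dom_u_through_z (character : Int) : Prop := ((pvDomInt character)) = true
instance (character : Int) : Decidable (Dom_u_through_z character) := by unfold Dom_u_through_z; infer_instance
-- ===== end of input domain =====

-- B replaces A's full divisor-list build over 1..n (then factor_list[-2]) by a scan for the
-- smallest divisor d in 2..sqrt(n), returning 2*(n//d) (or 2 when n has no such divisor).

-- ===== PORT A =====
def u_through_z (character : Int) : Int :=
  let factor_list : List Int :=
    (PySem.List.pyRange 1 (character + 1) 1).foldl
      (fun acc i => if PySem.Int.mod character i = 0 then acc ++ [i] else acc) []
  ((PySem.List.pyGet? factor_list (-2)).getD 0) * 2   -- none = IndexError, excluded by Pre_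

-- ===== PORT B =====
-- the while-loop of Source B; d starts at 2 and only increases
def uAltLoop (character : Int) (d : Nat) : Int :=
  if _h : (d : Int) * d ≤ character then
    if PySem.Int.mod character d = 0 then 2 * PySem.Int.floordiv character d
    else uAltLoop character (d + 1)
  else 2
termination_by (character + 2 - d).toNat
decreasing_by
  have hd : (d : Int) ≤ (d : Int) * d := by
    rcases Nat.eq_zero_or_pos d with h0 | h0
    · simp [h0]
    · nlinarith [Int.ofNat_le.mpr h0]
  omega

def u_through_z_alt (character : Int) : Int := uAltLoop character 2

-- ===== PRECONDITION & SPEC =====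
-- A raises IndexError when fewer than two divisors are collected, i.e. character < 2
def Pre_u_through_z (character : Int) : Prop := 2 ≤ character
instance (character : Int) : Decidable (Pre_u_through_z character) := by
  unfold Pre_u_through_z; infer_instance

def pvWitness_u_through_z : Int := 12

def Spec_u_through_z (character : Int) (out : Int) : Prop := out = u_through_z_alt character
instance (character : Int) (out : Int) : Decidable (Spec_u_through_z character out) := by
  unfold Spec_u_through_z; infer_instance

-- ===== CLAIM (what is proved, stated in full; the proofs are below) =====
def Claim_equal_u_through_z : Prop := ∀ (character : Int), Dom_u_through_z character →
  Pre_u_through_z character → Spec_u_through_z character (u_through_z character)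

-- ===== LEMMAS AND PROOFS =====

-- the last element of a strictly increasing list bounds every element
theorem le_getLast_of_pairwise_lt : ∀ (l : List Int), l.Pairwise (· < ·) →
    ∀ x ∈ l, ∀ (hne : l ≠ []), x ≤ l.getLast hne := by
  intro l
  induction l with
  | nil => intro _ x hx; cases hx
  | cons a t ih =>
    intro h x hx hne
    rcases List.pairwise_cons.mp h with ⟨ha, ht⟩
    cases t with
    | nil => simp at hx; simp [hx]
    | cons b u =>
      rw [List.getLast_cons (by simp)]
      rcases List.mem_cons.mp hx with rfl | hx'
      · exact le_of_lt (lt_of_lt_of_le (ha b (by simp))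
          (ih ht b (by simp) (by simp)))
      · exact ih ht x hx' (by simp)

-- any proper divisor of N is at most N / minFac N
theorem proper_divisor_le (N m : Nat) (hN : 2 ≤ N) (hm : m ∣ N) (hlt : m < N) (hp : 1 ≤ m) :
    m ≤ N / N.minFac := by
  have hq2 : 2 ≤ N / m := by
    have h1 : N / m ≠ 1 := fun h => by
      have := Nat.div_mul_cancel hm; rw [h, one_mul] at this; omega
    have : 1 ≤ N / m := Nat.one_le_div_iff (by omega) |>.mpr (Nat.le_of_dvd (by omega) hm)
    omega
  have hdq : N / m ∣ N := Nat.div_dvd_of_dvd hm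
  have hple : N.minFac ≤ N / m := Nat.minFac_le_of_dvd hq2 hdq
  have hppos : 0 < N.minFac := Nat.minFac_pos N
  rw [Nat.le_div_iff_mul_le hppos]
  calc m * N.minFac ≤ m * (N / m) := Nat.mul_le_mul_left m hple
    _ = N := Nat.mul_div_cancel' hm

-- Port A computes 2 * (N / minFac N)
theorem portA_eq (N : Nat) (hN : 2 ≤ N) :
    u_through_z (N : Int) = 2 * ((N / N.minFac : Nat) : Int) := by
  unfold u_through_z
  rw [PySem.List.foldl_append_ite_eq_filter]
  rw [PySem.List.pyRange_one_succ_right (by omega : (1:Int) ≤ (N:Int))]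
  rw [List.filter_append]
  have hself : (decide (PySem.Int.mod (N:Int) (N:Int) = 0)) = true := by
    rw [decide_eq_true_iff, PySem.Int.mod_eq_zero_iff_dvd]
  simp only [List.filter_cons, List.filter_nil, hself, if_pos]
  set M : List Int := (PySem.List.pyRange 1 (N:Int) 1).filter
      (fun i => decide (PySem.Int.mod (N:Int) i = 0)) with hM
  -- membership in M
  have hmemM : ∀ x : Int, x ∈ M → 1 ≤ x ∧ x < (N:Int) ∧ x ∣ (N:Int) := by
    intro x hx
    rw [hM, List.mem_filter] at hx
    rcases hx with ⟨hr, hd⟩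
    rw [PySem.List.mem_pyRange_one] at hr
    refine ⟨hr.1, hr.2, ?_⟩
    have := of_decide_eq_true hd
    exact (PySem.Int.mod_eq_zero_iff_dvd _ _).mp this
  -- q = N / minFac ∈ M
  set q : Nat := N / N.minFac with hq
  have hp2 : 2 ≤ N.minFac := (Nat.minFac_prime (by omega)).two_le
  have hqdvd : q ∣ N := Nat.div_dvd_of_dvd (Nat.minFac_dvd N)
  have hqpos : 1 ≤ q := Nat.one_le_div_iff (by omega) |>.mpr (Nat.minFac_le (by omega))
  have hqlt : q < N := Nat.div_lt_self (by omega) hp2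
  have hqM : ((q:Nat):Int) ∈ M := by
    rw [hM, List.mem_filter, PySem.List.mem_pyRange_one]
    refine ⟨⟨Int.ofNat_le.mpr hqpos, Int.ofNat_lt.mpr hqlt⟩, ?_⟩
    rw [decide_eq_true_iff, PySem.Int.mod_eq_zero_iff_dvd]
    exact_mod_cast hqdvd
  have hMne : M ≠ [] := fun h => by rw [h] at hqM; cases hqM
  -- M is strictly increasing
  have hMpw : M.Pairwise (· < ·) := (PySem.List.pairwise_lt_pyRange_one 1 (N:Int)).filter _
  -- index: (M ++ [N])[-2] = M.getLast
  have hMlen : 1 ≤ M.length := List.length_pos_iff.mpr hMne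
  have hlen : 2 ≤ (M ++ [(N:Int)]).length := by simp; omega
  simp only [List.nil_append]
  rw [PySem.List.pyGet?_neg_ofNat _ 2 (by omega) hlen]
  have hidx : (M ++ [(N:Int)]).length - 2 = M.length - 1 := by simp
  rw [hidx]
  have hgl : (M ++ [(N:Int)])[M.length - 1]? = some (M.getLast hMne) := by
    rw [List.getElem?_append_left (by omega : M.length - 1 < M.length)]
    rw [List.getElem?_eq_getElem (by omega)]
    simp [List.getLast_eq_getElem]
  rw [hgl]
  -- M.getLast = q
  have hlast_mem : M.getLast hMne ∈ M := List.getLast_mem hMne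
  have h1 : M.getLast hMne ≤ (q:Int) := by
    rcases hmemM _ hlast_mem with ⟨ha, hb, hcdvd⟩
    have hxe : M.getLast hMne = ((M.getLast hMne).toNat : Int) :=
      (Int.toNat_of_nonneg (by omega)).symm
    have hmnat : (M.getLast hMne).toNat ∣ N := by
      rw [hxe] at hcdvd; exact_mod_cast hcdvd
    have := proper_divisor_le N (M.getLast hMne).toNat hN hmnat (by omega) (by omega)
    omega
  have h2 : (q:Int) ≤ M.getLast hMne := le_getLast_of_pairwise_lt M hMpw _ hqM hMne
  have : M.getLast hMne = (q:Int) := le_antisymm h1 h2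
  rw [this]; simp [Option.getD]; ring

-- if minFac² exceeds N then N is its own smallest factor and N / minFac N = 1
theorem div_minFac_eq_one (N : Nat) (hN : 2 ≤ N) (hc : N < N.minFac * N.minFac) :
    N / N.minFac = 1 := by
  have hpd : N.minFac ∣ N := Nat.minFac_dvd N
  have hqd : N / N.minFac ∣ N := Nat.div_dvd_of_dvd hpd
  have hq1le : 1 ≤ N / N.minFac :=
    Nat.one_le_div_iff (Nat.minFac_pos N) |>.mpr (Nat.minFac_le (by omega))
  by_contra hne
  have hq2 : 2 ≤ N / N.minFac := by omega
  have h3 : N.minFac ≤ N / N.minFac := Nat.minFac_le_of_dvd hq2 hqd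
  have h4 : N.minFac * N.minFac ≤ N.minFac * (N / N.minFac) := Nat.mul_le_mul_left _ h3
  rw [Nat.mul_div_cancel' hpd] at h4
  omega

-- Port B's loop, started anywhere in [2, minFac N], computes 2 * (N / minFac N)
theorem altLoop_eq (N : Nat) (hN : 2 ≤ N) :
    ∀ k d, 2 ≤ d → d ≤ N.minFac → N.minFac - d = k →
    uAltLoop (N : Int) d = 2 * ((N / N.minFac : Nat) : Int) := by
  have hp2 : 2 ≤ N.minFac := (Nat.minFac_prime (by omega)).two_le
  have hpd : N.minFac ∣ N := Nat.minFac_dvd N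
  intro k
  induction k with
  | zero =>
    intro d hd2 hdle hk
    have hdp : d = N.minFac := by omega
    rw [uAltLoop]
    by_cases hsq : ((d:Nat):Int) * (d:Nat) ≤ (N:Int)
    · rw [dif_pos hsq, if_pos]
      · rw [PySem.Int.floordiv_eq_ediv_of_pos
          (by exact_mod_cast (show 0 < d by omega) : (0:Int) < (d:Int))]
        rw [hdp]; norm_cast
      · rw [PySem.Int.mod_eq_zero_iff_dvd, hdp]; exact_mod_cast hpd
    · rw [dif_neg hsq]
      have hsqn : N < d * d := by exact_mod_cast not_le.mp hsq
      rw [div_minFac_eq_one N hN (by rw [← hdp]; exact hsqn)]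
      norm_num
  | succ k ih =>
    intro d hd2 hdle hk
    have hdlt : d < N.minFac := by omega
    have hdnd : ¬ (d:Nat) ∣ N := fun h => absurd (Nat.minFac_le_of_dvd hd2 h) (by omega)
    rw [uAltLoop]
    by_cases hsq : ((d:Nat):Int) * (d:Nat) ≤ (N:Int)
    · rw [dif_pos hsq, if_neg]
      · exact ih (d+1) (by omega) (by omega) (by omega)
      · rw [PySem.Int.mod_eq_zero_iff_dvd]
        intro h; exact hdnd (by exact_mod_cast h)
    · rw [dif_neg hsq]
      have hsqn : N < d * d := by exact_mod_cast not_le.mp hsq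
      rw [div_minFac_eq_one N hN (lt_of_lt_of_le hsqn (Nat.mul_le_mul hdle hdle))]
      norm_num

-- ===== VERDICT (by name: the statement is the Claim_ definition above) =====
theorem u_through_z_spec : Claim_equal_u_through_z := by
  intro character _ hpre
  unfold Spec_u_through_z u_through_z_alt Pre_u_through_z at *
  have hc : character = ((character.toNat : Nat) : Int) := (Int.toNat_of_nonneg (by omega)).symm
  have hN : 2 ≤ character.toNat := by omega
  rw [hc, portA_eq _ hN, altLoop_eq _ hN (character.toNat.minFac - 2) 2 (by omega)
    ((Nat.minFac_prime (by omega)).two_le) rfl]
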